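-- pv_equiv track=rewrite | github.com/vokator-online/mano_failai | asmens_kodas_pysimplegui.py | check_asmens_kodas
-- ===== SOURCE A (Python) =====
-- def check_asmens_kodas(asmens_kodas):
--     if not asmens_kodas.isnumeric() or len(asmens_kodas) != 11:
--         return 'Neteisingas: turi būti 11 skaitmenų skaičius.'
--
--     menuo = int(asmens_kodas[3:5])
--     if menuo < 1 or menuo > 12:
--         return 'Neteisingas: mėnuo gimimo datoje negali būti didesnis už 12 arba lygus 0.'
--
--     diena = int(asmens_kodas[5:7])
--     if diena < 1 or diena > 31:
--         return 'Neteisingas: diena gimimo datoje negali būti didesnė už 31 arba lygus 0.'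
--
--     # Paskutinio skaičiaus tikrinimas
--     daugikliai = '1234567891'
--     kiti_daugikliai = '3456789123'
--     kontrolinis = 0
--
--     for daugiklio_nr, skaitmuo in enumerate(asmens_kodas[:10]):
--         kontrolinis += int(skaitmuo) * int(daugikliai[daugiklio_nr])
--
--     if kontrolinis % 11 == 10:
--         kontrolinis = 0
--         for daugiklio_nr, skaitmuo in enumerate(asmens_kodas[:10]):
--             kontrolinis += int(skaitmuo) * int(kiti_daugikliai[daugiklio_nr])
--
--     tikrinamas = kontrolinis % 11
--     if tikrinamas == 10:
--         tikrinamas = 0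
--
--     paskutinis = int(asmens_kodas[10])
--     if paskutinis != tikrinamas:
--         return 'Neteisingas: paskutinis skaičius klaidingas.'
--
--     return 'TEISINGAS'
-- ===== SOURCE B (Python) =====
-- def check_asmens_kodas(asmens_kodas):
--     if not asmens_kodas.isnumeric() or len(asmens_kodas) != 11:
--         return 'Neteisingas: turi būti 11 skaitmenų skaičius.'
--
--     # Convert once to a digit list; every later step is integer arithmetic on it.
--     d = [int(ch) for ch in asmens_kodas]
--
--     menuo = 10 * d[3] + d[4]
--     if menuo < 1 or menuo > 12:
--         return 'Neteisingas: mėnuo gimimo datoje negali būti didesnis už 12 arba lygus 0.'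
--
--     diena = 10 * d[5] + d[6]
--     if diena < 1 or diena > 31:
--         return 'Neteisingas: diena gimimo datoje negali būti didesnė už 31 arba lygus 0.'
--
--     # One pass accumulating the first weighted sum and the plain digit total.
--     s1 = 0
--     total = 0
--     for i, x in enumerate(d[:10]):
--         s1 += x * (i % 9 + 1)
--         total += x
--
--     tikrinamas = s1 % 11
--     if tikrinamas == 10:
--         # The second weight row 3,4,5,6,7,8,9,1,2,3 exceeds the first row by 2 at every
--         # position except 7 and 8, where it is 9 smaller; so the second weighted sum is
--         # derived in O(1) instead of a second pass, and % 10 maps a remainder of 10 to 0.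
--         tikrinamas = (s1 + 2 * total - 9 * (d[7] + d[8])) % 11 % 10
--
--     if d[10] != tikrinamas:
--         return 'Neteisingas: paskutinis skaičius klaidingas.'
--
--     return 'TEISINGAS'
-- ===== Notes on version B (the rewrite author's own statement) =====
-- stated objective: alternative
-- what changed: B converts the string once into a digit list and then works purely arithmetically: month and day are computed from digits instead of parsing slices, one pass accumulates the first weighted sum together with the plain digit total, and the second weighted sum is derived in O(1) from those (second weight row = first row + 2 except positions 7 and 8 where it is 9 smaller) instead of running a second weighted pass; the 10->0 remainder mapping is done with % 10.
import Mathlib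
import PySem

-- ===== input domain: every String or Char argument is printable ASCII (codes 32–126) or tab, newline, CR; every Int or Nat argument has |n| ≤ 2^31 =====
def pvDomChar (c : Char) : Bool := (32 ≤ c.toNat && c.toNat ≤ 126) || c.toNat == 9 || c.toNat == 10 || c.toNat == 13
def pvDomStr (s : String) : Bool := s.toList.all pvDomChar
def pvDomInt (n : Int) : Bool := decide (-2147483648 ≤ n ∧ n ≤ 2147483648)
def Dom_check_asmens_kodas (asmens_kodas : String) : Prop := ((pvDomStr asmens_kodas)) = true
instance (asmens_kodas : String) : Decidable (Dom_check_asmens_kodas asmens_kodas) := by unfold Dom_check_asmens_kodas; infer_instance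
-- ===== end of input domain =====

-- B converts the string ONCE into a digit list and then works purely arithmetically: month/day
-- from digits, one pass accumulating the first weighted sum and the digit total, and the second
-- weighted sum derived in O(1) from those instead of a second pass; objective: alternative.

-- int(c) for a single character c (exact: ofChars? is Python's int(); the guard
-- 'isnumeric' ensures it is only ever applied to a digit, so getD 0 is unreachable)
def pyIntChar (c : Char) : Int := (PySem.Int.ofChars? [c]).getD 0
-- int(s) for a digit substring (same remark: only applied to all-digit slices)
def pyIntStr (cs : List Char) : Int := (PySem.Int.ofChars? cs).getD 0

-- ===== PORT A =====
-- str.isnumeric == str.isdigit on the printable-ASCII domain (no Unicode numerics there): exact on Dom.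
def check_asmens_kodas (asmens_kodas : String) : String :=
  let cs := asmens_kodas.toList
  if ¬ (PySem.Chars.strIsdigit cs = true) ∨ cs.length ≠ 11 then
    "Neteisingas: turi būti 11 skaitmenų skaičius."
  else
    let menuo := pyIntStr (PySem.List.slice cs (some 3) (some 5))
    if menuo < 1 ∨ menuo > 12 then
      "Neteisingas: mėnuo gimimo datoje negali būti didesnis už 12 arba lygus 0."
    else
      let diena := pyIntStr (PySem.List.slice cs (some 5) (some 7))
      if diena < 1 ∨ diena > 31 then
        "Neteisingas: diena gimimo datoje negali būti didesnė už 31 arba lygus 0."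
      else
        let daugikliai := "1234567891".toList
        let kiti_daugikliai := "3456789123".toList
        let kontrolinis :=
          (PySem.List.enumerate (PySem.List.slice cs none (some 10))).foldl
            (fun acc p => acc + pyIntChar p.2 * pyIntChar (PySem.List.pyGetD daugikliai p.1 ' ')) 0
        let kontrolinis :=
          if PySem.Int.mod kontrolinis 11 == 10 then
            (PySem.List.enumerate (PySem.List.slice cs none (some 10))).foldl
              (fun acc p => acc + pyIntChar p.2 * pyIntChar (PySem.List.pyGetD kiti_daugikliai p.1 ' ')) 0
          else kontrolinis
        let tikrinamas := PySem.Int.mod kontrolinis 11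
        let tikrinamas := if tikrinamas == 10 then (0 : Int) else tikrinamas
        let paskutinis := pyIntChar (PySem.List.pyGetD cs 10 ' ')
        if paskutinis ≠ tikrinamas then
          "Neteisingas: paskutinis skaičius klaidingas."
        else
          "TEISINGAS"

-- ===== PORT B =====
-- (d[i] never raises after the length guard, so pyGetD's default 0 is unreachable)
def check_asmens_kodas_alt (asmens_kodas : String) : String :=
  let cs := asmens_kodas.toList
  if ¬ (PySem.Chars.strIsdigit cs = true) ∨ cs.length ≠ 11 then
    "Neteisingas: turi būti 11 skaitmenų skaičius."
  else
    let d := cs.map pyIntChar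
    let menuo := 10 * PySem.List.pyGetD d 3 0 + PySem.List.pyGetD d 4 0
    if menuo < 1 ∨ menuo > 12 then
      "Neteisingas: mėnuo gimimo datoje negali būti didesnis už 12 arba lygus 0."
    else
      let diena := 10 * PySem.List.pyGetD d 5 0 + PySem.List.pyGetD d 6 0
      if diena < 1 ∨ diena > 31 then
        "Neteisingas: diena gimimo datoje negali būti didesnė už 31 arba lygus 0."
      else
        let p :=
          (PySem.List.enumerate (PySem.List.slice d none (some 10))).foldl
            (fun (st : Int × Int) q =>
              (st.1 + q.2 * (PySem.Int.mod (q.1 : Int) 9 + 1), st.2 + q.2)) (0, 0)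
        let tikrinamas := PySem.Int.mod p.1 11
        let tikrinamas :=
          if tikrinamas == 10 then
            PySem.Int.mod (PySem.Int.mod
              (p.1 + 2 * p.2 - 9 * (PySem.List.pyGetD d 7 0 + PySem.List.pyGetD d 8 0)) 11) 10
          else tikrinamas
        if PySem.List.pyGetD d 10 0 ≠ tikrinamas then
          "Neteisingas: paskutinis skaičius klaidingas."
        else
          "TEISINGAS"

-- ===== PRECONDITION & SPEC =====
def Spec_check_asmens_kodas (asmens_kodas : String) (out : String) : Prop := out = check_asmens_kodas_alt asmens_kodas
instance (asmens_kodas : String) (out : String) : Decidable (Spec_check_asmens_kodas asmens_kodas out) := by unfold Spec_check_asmens_kodas; infer_instance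

-- ===== CLAIM (what is proved, stated in full; the proofs are below) =====
def Claim_equal_check_asmens_kodas : Prop := ∀ (asmens_kodas : String), Dom_check_asmens_kodas asmens_kodas → Spec_check_asmens_kodas asmens_kodas (check_asmens_kodas asmens_kodas)

-- ===== LEMMAS AND PROOFS =====

lemma list_len11 {α : Type} (cs : List α) (h : cs.length = 11) :
    ∃ a0 a1 a2 a3 a4 a5 a6 a7 a8 a9 a10,
      cs = [a0, a1, a2, a3, a4, a5, a6, a7, a8, a9, a10] := by
  match cs, h with
  | [a0, a1, a2, a3, a4, a5, a6, a7, a8, a9, a10], _ =>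
    exact ⟨a0, a1, a2, a3, a4, a5, a6, a7, a8, a9, a10, rfl⟩

lemma digit_cases (c : Char) (h : PySem.Chars.isdigit c = true) :
    c = '0' ∨ c = '1' ∨ c = '2' ∨ c = '3' ∨ c = '4' ∨ c = '5' ∨ c = '6' ∨ c = '7' ∨ c = '8' ∨ c = '9' := by
  simp [PySem.Chars.isdigit, Char.le_def, UInt32.le_iff_toNat_le] at h
  obtain ⟨h1, h2⟩ := h
  have key : ∀ n : Nat, c.val.toNat = n → 48 ≤ n → n ≤ 57 → c = Char.ofNat n := by
    intro n hn hl57 hr57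
    apply Char.ext
    apply UInt32.toNat_inj.mp
    rw [hn]
    interval_cases n <;> rfl
  have hl : 48 ≤ c.val.toNat := h1
  have hr : c.val.toNat ≤ 57 := h2
  interval_cases hN : c.val.toNat <;>
    [ exact Or.inl (key _ rfl (by norm_num) (by norm_num));
      exact Or.inr (Or.inl (key _ rfl (by norm_num) (by norm_num)));
      exact Or.inr (Or.inr (Or.inl (key _ rfl (by norm_num) (by norm_num))));
      exact Or.inr (Or.inr (Or.inr (Or.inl (key _ rfl (by norm_num) (by norm_num)))));
      exact Or.inr (Or.inr (Or.inr (Or.inr (Or.inl (key _ rfl (by norm_num) (by norm_num))))));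
      exact Or.inr (Or.inr (Or.inr (Or.inr (Or.inr (Or.inl (key _ rfl (by norm_num) (by norm_num)))))));
      exact Or.inr (Or.inr (Or.inr (Or.inr (Or.inr (Or.inr (Or.inl (key _ rfl (by norm_num) (by norm_num))))))));
      exact Or.inr (Or.inr (Or.inr (Or.inr (Or.inr (Or.inr (Or.inr (Or.inl (key _ rfl (by norm_num) (by norm_num)))))))));
      exact Or.inr (Or.inr (Or.inr (Or.inr (Or.inr (Or.inr (Or.inr (Or.inr (Or.inl (key _ rfl (by norm_num) (by norm_num))))))))));
      exact Or.inr (Or.inr (Or.inr (Or.inr (Or.inr (Or.inr (Or.inr (Or.inr (Or.inr (key _ rfl (by norm_num) (by norm_num))))))))))]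

-- int('cd') = 10*int(c) + int(d) for digit characters
lemma ofChars_two (c d : Char) (hc : PySem.Chars.isdigit c = true) (hd : PySem.Chars.isdigit d = true) :
    pyIntStr [c, d] = 10 * pyIntChar c + pyIntChar d := by
  rcases digit_cases c hc with h|h|h|h|h|h|h|h|h|h <;> subst h <;>
    (rcases digit_cases d hd with h|h|h|h|h|h|h|h|h|h <;> subst h <;> decide)

-- ===== VERDICT (by name: the statement is the Claim_ definition above) =====
theorem check_asmens_kodas_spec : Claim_equal_check_asmens_kodas := by
  intro s _
  unfold Spec_check_asmens_kodas check_asmens_kodas check_asmens_kodas_alt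
  set cs := s.toList with hcs
  by_cases hg : ¬ (PySem.Chars.strIsdigit cs = true) ∨ cs.length ≠ 11
  · simp only [hg, if_pos]
  · simp only [hg, if_neg, not_false_iff]
    push Not at hg
    obtain ⟨a0, a1, a2, a3, a4, a5, a6, a7, a8, a9, a10, hceq⟩ := list_len11 cs hg.2
    have hall : ∀ c ∈ cs, PySem.Chars.isdigit c = true := by
      have := hg.1
      simp [PySem.Chars.strIsdigit, List.all_eq_true] at this
      exact fun c hc => this.2 c hc
    rw [hceq] at hall
    have h3 := hall a3 (by simp)
    have h4 := hall a4 (by simp)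
    have h5 := hall a5 (by simp)
    have h6 := hall a6 (by simp)
    rw [hceq]
    rw [show PySem.List.slice [a0,a1,a2,a3,a4,a5,a6,a7,a8,a9,a10] (some 3) (some 5) = [a3,a4] from by
          simp [PySem.List.slice],
        show PySem.List.slice [a0,a1,a2,a3,a4,a5,a6,a7,a8,a9,a10] (some 5) (some 7) = [a5,a6] from by
          simp [PySem.List.slice],
        show PySem.List.slice [a0,a1,a2,a3,a4,a5,a6,a7,a8,a9,a10] none (some 10) = [a0,a1,a2,a3,a4,a5,a6,a7,a8,a9] from by
          simp [PySem.List.slice],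
        show (([a0,a1,a2,a3,a4,a5,a6,a7,a8,a9,a10].map pyIntChar) : List Int) =
          [pyIntChar a0, pyIntChar a1, pyIntChar a2, pyIntChar a3, pyIntChar a4, pyIntChar a5,
           pyIntChar a6, pyIntChar a7, pyIntChar a8, pyIntChar a9, pyIntChar a10] from by simp,
        show PySem.List.slice [pyIntChar a0, pyIntChar a1, pyIntChar a2, pyIntChar a3, pyIntChar a4,
           pyIntChar a5, pyIntChar a6, pyIntChar a7, pyIntChar a8, pyIntChar a9, pyIntChar a10] none (some 10)
          = [pyIntChar a0, pyIntChar a1, pyIntChar a2, pyIntChar a3, pyIntChar a4, pyIntChar a5,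
             pyIntChar a6, pyIntChar a7, pyIntChar a8, pyIntChar a9] from by simp [PySem.List.slice],
        ofChars_two a3 a4 h3 h4, ofChars_two a5 a6 h5 h6]
    simp only [PySem.List.enumerate_nil, PySem.List.enumerate_cons, List.foldl,
      PySem.List.pyGetD, PySem.List.pyGet?, PySem.List.pyIdx?]
    norm_num [
      (show "1234567891".toList = ['1','2','3','4','5','6','7','8','9','1'] from by decide),
      (show "3456789123".toList = ['3','4','5','6','7','8','9','1','2','3'] from by decide),
      (show pyIntChar '1' = 1 from by decide), (show pyIntChar '2' = 2 from by decide),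
      (show pyIntChar '3' = 3 from by decide), (show pyIntChar '4' = 4 from by decide),
      (show pyIntChar '5' = 5 from by decide), (show pyIntChar '6' = 6 from by decide),
      (show pyIntChar '7' = 7 from by decide), (show pyIntChar '8' = 8 from by decide),
      (show pyIntChar '9' = 9 from by decide),
      (show PySem.Int.mod 0 9 = 0 from by decide), (show PySem.Int.mod 1 9 = 1 from by decide),
      (show PySem.Int.mod 2 9 = 2 from by decide), (show PySem.Int.mod 3 9 = 3 from by decide),
      (show PySem.Int.mod 4 9 = 4 from by decide), (show PySem.Int.mod 5 9 = 5 from by decide),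
      (show PySem.Int.mod 6 9 = 6 from by decide), (show PySem.Int.mod 7 9 = 7 from by decide),
      (show PySem.Int.mod 8 9 = 8 from by decide), (show PySem.Int.mod 9 9 = 0 from by decide),
      (show Int.toNat 2 = 2 from rfl), (show Int.toNat 3 = 3 from rfl),
      (show Int.toNat 4 = 4 from rfl), (show Int.toNat 5 = 5 from rfl),
      (show Int.toNat 6 = 6 from rfl), (show Int.toNat 7 = 7 from rfl),
      (show Int.toNat 8 = 8 from rfl), (show Int.toNat 9 = 9 from rfl),
      (show Int.toNat 10 = 10 from rfl)]
    ring_nf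
    split_ifs <;> first | rfl | omega
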